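-- pv_equiv track=rewrite | github.com/dlscoccia/Markdown2HTML | markdown2html.py | changeBoldOrEmphasis
-- ===== SOURCE A (Python) =====
-- def changeBoldOrEmphasis(line, replace, tags):
--     '''Function to change any text into bold or emphasis tags'''
--     changeNeeded = line.count(replace)
--     newLine = line
--     while (changeNeeded >= 2):
--         newLine = newLine.replace(replace, tags[0],1)
--         newLine = newLine.replace(replace, tags[1],1)
--         changeNeeded -= 2
--     return(newLine)
-- ===== SOURCE B (Python) =====
-- def changeBoldOrEmphasis(line, replace, tags):
--     '''Split on the delimiter once, then stitch the parts back together with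
--     alternating open/close tags; an unpaired final delimiter is put back as-is.'''
--     parts = line.split(replace)
--     if len(parts) < 3:
--         return line
--     out = [parts[0]]
--     rest = parts[1:]
--     while len(rest) >= 2:
--         out += [tags[0], rest[0], tags[1], rest[1]]
--         rest = rest[2:]
--     if rest:
--         out += [replace, rest[0]]
--     return "".join(out)
-- ===== Notes on version B (the rewrite author's own statement) =====
-- stated objective: alternative
-- what changed: A repeatedly calls str.replace(pat, tag, 1) count//2 times in pairs, rescanning the string from the start for every replacement; B splits the line on the delimiter once and joins the parts back with alternating open/close tags, putting an unpaired trailing delimiter back verbatim. …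
-- outside the precondition, e.g. on changeBoldOrEmphasis('ab', '', ['<b>', '</b>']): A returns '</b><b>ab', B raises ValueError; on changeBoldOrEmphasis('*a*', '*', ['*x*', 'y']): A returns 'yx*a*', B returns '*x*ay'; on changeBoldOrEmphasis('aabbaab', 'ab', ['', '']): A returns 'aab', B returns 'aba'
import Mathlib
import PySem

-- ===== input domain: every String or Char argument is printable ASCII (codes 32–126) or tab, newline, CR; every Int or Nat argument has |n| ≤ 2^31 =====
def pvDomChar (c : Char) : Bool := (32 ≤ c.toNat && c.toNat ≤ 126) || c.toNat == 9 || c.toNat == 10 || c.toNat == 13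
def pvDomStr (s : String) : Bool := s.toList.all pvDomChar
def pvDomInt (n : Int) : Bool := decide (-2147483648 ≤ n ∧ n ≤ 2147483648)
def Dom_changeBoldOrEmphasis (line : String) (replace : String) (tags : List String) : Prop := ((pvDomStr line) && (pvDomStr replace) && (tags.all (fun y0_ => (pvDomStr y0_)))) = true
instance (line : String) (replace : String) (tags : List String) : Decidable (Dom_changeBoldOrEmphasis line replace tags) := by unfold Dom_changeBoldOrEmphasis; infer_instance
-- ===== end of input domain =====

-- B replaces A's count-down loop of paired str.replace(…,1) calls by one split on the
-- delimiter followed by one join with alternating tags (objective: alternative decomposition).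

-- ===== PORT A =====
-- s.replace(pat, tag, 1): replace the FIRST occurrence only (exact, incl. pat = "" which prepends tag)
def pvRep1 (s pat tag : List Char) : List Char :=
  let j := PySem.Chars.find s pat
  if j < 0 then s else s.take j.toNat ++ tag ++ s.drop (j.toNat + pat.length)

-- 'while changeNeeded >= 2: two replaces; changeNeeded -= 2'
def pvLoopA (pat t0 t1 : List Char) (n : Int) (s : List Char) : List Char :=
  if 2 ≤ n then pvLoopA pat t0 t1 (n - 2) (pvRep1 (pvRep1 s pat t0) pat t1) else s
termination_by n.toNat
decreasing_by omega

def changeBoldOrEmphasis (line : String) (replace : String) (tags : List String) : String :=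
  -- tags[0] / tags[1]: a missing index raises IndexError in Python; those inputs are outside Pre_
  let t0 := (PySem.List.pyGetD tags 0 "").toList
  let t1 := (PySem.List.pyGetD tags 1 "").toList
  String.ofList (pvLoopA replace.toList t0 t1 (PySem.Str.count line replace : Int) line.toList)

-- ===== PORT B =====
-- 'while len(rest) >= 2: out += [tags[0], rest[0], tags[1], rest[1]]; rest = rest[2:]'
def pvWhileB (t0 t1 : List Char) (out rest : List (List Char)) : List (List Char) × List (List Char) :=
  match rest with
  | a :: b :: rest' => pvWhileB t0 t1 (out ++ [t0, a, t1, b]) rest'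
  | _ => (out, rest)

def changeBoldOrEmphasis_alt (line : String) (replace : String) (tags : List String) : String :=
  -- parts = line.split(replace): split? is none for replace = "" (Python ValueError, outside Pre_)
  match PySem.Chars.split? line.toList replace.toList with
  | none => line
  | some [] => line      -- split always returns at least one part; dead branch for totality
  | some (p0 :: rest) =>
    if rest.length < 2 then line      -- 'if len(parts) < 3: return line'
    else
      -- tags[0] / tags[1]: a missing index raises IndexError in Python; outside Pre_
      let t0 := (PySem.List.pyGetD tags 0 "").toList
      let t1 := (PySem.List.pyGetD tags 1 "").toList
      let pr := pvWhileB t0 t1 [p0] rest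
      let out2 := match pr.2 with
        | [] => pr.1
        | r0 :: _ => pr.1 ++ [replace.toList, r0]      -- 'if rest: out += [replace, rest[0]]'
      String.ofList (PySem.Chars.join [] out2)

-- ===== PRECONDITION & SPEC =====
-- Pre_ excludes: the empty delimiter, on which B's str.split raises ValueError while A returns;
-- inputs where A raises IndexError (two or more delimiters but fewer than two tags); and, when at
-- least one pair gets replaced, tags that are empty or share a character with the delimiter — there
-- inserted tag text can itself (help to) form new delimiter occurrences, and A's rescan-from-the-start
-- replace(…,1) and B's one-shot split legitimately disagree about which text counts as a delimiter.
def Pre_changeBoldOrEmphasis (line : String) (replace : String) (tags : List String) : Prop :=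
  replace.toList ≠ [] ∧
    (PySem.Str.count line replace < 2 ∨
      (2 ≤ tags.length ∧
        ((tags.take 2).all
          (fun t => !t.toList.isEmpty && replace.toList.all (fun c => !t.toList.contains c))) = true))
instance (line : String) (replace : String) (tags : List String) : Decidable (Pre_changeBoldOrEmphasis line replace tags) := by unfold Pre_changeBoldOrEmphasis; infer_instance

def pvWitness_changeBoldOrEmphasis : String × String × List String := ("*hi*!", "*", ["<em>", "</em>"])

def Spec_changeBoldOrEmphasis (line : String) (replace : String) (tags : List String) (out : String) : Prop := out = changeBoldOrEmphasis_alt line replace tags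
instance (line : String) (replace : String) (tags : List String) (out : String) : Decidable (Spec_changeBoldOrEmphasis line replace tags out) := by unfold Spec_changeBoldOrEmphasis; infer_instance

-- ===== CLAIM (what is proved, stated in full; the proofs are below) =====
def Claim_equal_changeBoldOrEmphasis : Prop := ∀ (line : String) (replace : String) (tags : List String), Dom_changeBoldOrEmphasis line replace tags → Pre_changeBoldOrEmphasis line replace tags → Spec_changeBoldOrEmphasis line replace tags (changeBoldOrEmphasis line replace tags)

-- ===== LEMMAS AND PROOFS =====

-- ---------- A-side loop reshaped into iterated pairs of single replaces ----------
def pvPairIter (pat t0 t1 : List Char) : Nat → List Char → List Char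
  | 0, s => s
  | p + 1, s => pvPairIter pat t0 t1 p (pvRep1 (pvRep1 s pat t0) pat t1)

lemma pv_loopA_eq_pairIter (pat t0 t1 : List Char) :
    ∀ (N : Nat) (n : Int) (s : List Char), n.toNat ≤ N →
      pvLoopA pat t0 t1 n s = pvPairIter pat t0 t1 (n.toNat / 2) s := by
  intro N
  induction N with
  | zero =>
    intro n s hn
    rw [pvLoopA, if_neg (by omega)]
    have : n.toNat / 2 = 0 := by omega
    rw [this]; rfl
  | succ N ih =>
    intro n s hn
    by_cases h2 : 2 ≤ n
    · rw [pvLoopA, if_pos h2, ih (n - 2) _ (by omega)]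
      have : n.toNat / 2 = (n - 2).toNat / 2 + 1 := by omega
      rw [this]; rfl
    · rw [pvLoopA, if_neg h2]
      have : n.toNat / 2 = 0 := by omega
      rw [this]; rfl

-- ---------- mirror of PySem.Chars.splitOn.go / count.go with explicit structure ----------
def pvConsHead (p : List Char) : List (List Char) → List (List Char)
  | [] => [p]
  | h :: t => (p ++ h) :: t

def pvParts (sep : List Char) : Nat → List Char → List (List Char)
  | 0, l => [l]
  | _ + 1, [] => [[]]
  | fuel + 1, c :: rest =>
    if sep.isPrefixOf (c :: rest) then [] :: pvParts sep fuel (List.drop sep.length (c :: rest))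
    else pvConsHead [c] (pvParts sep fuel rest)

def pvCount (sub : List Char) : Nat → List Char → Nat
  | 0, _ => 0
  | _ + 1, [] => 0
  | fuel + 1, c :: rest =>
    if sub.isPrefixOf (c :: rest) then pvCount sub fuel (List.drop sub.length (c :: rest)) + 1
    else pvCount sub fuel rest

lemma pvConsHead_ne_nil (p : List Char) (P : List (List Char)) : pvConsHead p P ≠ [] := by
  cases P <;> simp [pvConsHead]

lemma pvParts_ne_nil (sep : List Char) : ∀ (fuel : Nat) (l : List Char), pvParts sep fuel l ≠ [] := by
  intro fuel l
  match fuel, l with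
  | 0, l => simp [pvParts]
  | _ + 1, [] => simp [pvParts]
  | fuel + 1, c :: rest =>
    rw [pvParts]
    split
    · simp
    · exact pvConsHead_ne_nil _ _

lemma pvConsHead_nil_of_ne (P : List (List Char)) (h : P ≠ []) : pvConsHead [] P = P := by
  cases P with
  | nil => exact absurd rfl h
  | cons q t => simp [pvConsHead]

lemma pvConsHead_pvConsHead (a b : List Char) (P : List (List Char)) :
    pvConsHead a (pvConsHead b P) = pvConsHead (a ++ b) P := by
  cases P <;> simp [pvConsHead]

lemma pv_go_split (sep : List Char) :
    ∀ (fuel : Nat) (l cur : List Char) (acc : List (List Char)),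
      PySem.Chars.splitOn.go sep fuel l cur acc = acc.reverse ++ pvConsHead cur.reverse (pvParts sep fuel l) := by
  intro fuel
  induction fuel with
  | zero =>
    intro l cur acc
    rw [PySem.Chars.splitOn.go]
    simp [pvParts, pvConsHead]
  | succ fuel ih =>
    intro l cur acc
    cases l with
    | nil =>
      rw [PySem.Chars.splitOn.go]
      simp [pvParts, pvConsHead]
      omega
    | cons c rest =>
      rw [PySem.Chars.splitOn.go]
      split
      · rw [ih, pvParts, if_pos (by assumption)]
        simp only [List.reverse_nil]
        rw [pvConsHead_nil_of_ne _ (pvParts_ne_nil _ _ _)]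
        simp [pvConsHead]
      · rw [ih, pvParts, if_neg (by assumption), pvConsHead_pvConsHead]
        simp

lemma pv_splitOn_eq (sep l : List Char) :
    PySem.Chars.splitOn l sep = pvParts sep (l.length + 1) l := by
  rw [PySem.Chars.splitOn, pv_go_split]
  simp [pvConsHead_nil_of_ne _ (pvParts_ne_nil _ _ _)]

lemma pv_go_count (sub : List Char) :
    ∀ (fuel : Nat) (l : List Char) (acc : Nat),
      PySem.Chars.count.go sub fuel l acc = acc + pvCount sub fuel l := by
  intro fuel
  induction fuel with
  | zero => intro l acc; rw [PySem.Chars.count.go]; simp [pvCount]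
  | succ fuel ih =>
    intro l acc
    cases l with
    | nil =>
      rw [PySem.Chars.count.go]
      simp [pvCount]
      omega
    | cons c rest =>
      rw [PySem.Chars.count.go]
      split
      · rw [ih, pvCount, if_pos (by assumption)]; omega
      · rw [ih, pvCount, if_neg (by assumption)]

lemma pv_count_eq (sub l : List Char) (h : sub ≠ []) :
    PySem.Chars.count l sub = pvCount sub l.length l := by
  rw [PySem.Chars.count, if_neg (by simpa using h), pv_go_count]
  omega

lemma pvConsHead_length (p : List Char) (P : List (List Char)) (h : P ≠ []) :
    (pvConsHead p P).length = P.length := by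
  cases P with
  | nil => exact absurd rfl h
  | cons q t => simp [pvConsHead]

lemma pvParts_length (sep : List Char) :
    ∀ (fuel : Nat) (l : List Char), (pvParts sep fuel l).length = pvCount sep fuel l + 1 := by
  intro fuel
  induction fuel with
  | zero => intro l; simp [pvParts, pvCount]
  | succ fuel ih =>
    intro l
    cases l with
    | nil => simp [pvParts, pvCount]
    | cons c rest =>
      rw [pvParts, pvCount]
      split
      · simp [ih]
      · rw [pvConsHead_length _ _ (pvParts_ne_nil _ _ _), ih]

lemma pvParts_fuel (sep : List Char) (hsep : sep ≠ []) :
    ∀ (f1 f2 : Nat) (l : List Char), l.length ≤ f1 → l.length ≤ f2 →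
      pvParts sep f1 l = pvParts sep f2 l := by
  intro f1
  induction f1 with
  | zero =>
    intro f2 l h1 _
    have : l = [] := by cases l <;> simp_all
    subst this
    cases f2 <;> simp [pvParts]
  | succ f1 ih =>
    intro f2 l h1 h2
    cases l with
    | nil => cases f2 <;> simp [pvParts]
    | cons c rest =>
      cases f2 with
      | zero => simp at h2
      | succ f2 =>
        rw [pvParts, pvParts]
        have hs1 : 1 ≤ sep.length := by cases sep <;> simp_all
        simp only [List.length_cons] at h1 h2
        split
        · rw [ih f2 _ (by simp only [List.length_drop, List.length_cons]; omega)
            (by simp only [List.length_drop, List.length_cons]; omega)]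
        · rw [ih f2 _ (by omega) (by omega)]

-- ---------- the split decomposition: joined parts and the first-occurrence property ----------
def pvJoin (sep : List Char) : List (List Char) → List Char
  | [] => []
  | [p] => p
  | p :: q :: rest => p ++ sep ++ pvJoin sep (q :: rest)

def pvGood (sep : List Char) : List (List Char) → Prop
  | [] => True
  | [_] => True
  | p :: q :: rest => (∀ j < p.length, ¬ sep <+: (p ++ sep).drop j) ∧ pvGood sep (q :: rest)

lemma pvParts_spec (sep : List Char) (hsep : sep ≠ []) :
    ∀ (fuel : Nat) (l : List Char), l.length ≤ fuel →
      l = pvJoin sep (pvParts sep fuel l) ∧ pvGood sep (pvParts sep fuel l) := by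
  intro fuel
  induction fuel with
  | zero =>
    intro l h1
    have : l = [] := by cases l <;> simp_all
    subst this
    simp [pvParts, pvJoin, pvGood]
  | succ fuel ih =>
    intro l h1
    cases l with
    | nil => simp [pvParts, pvJoin, pvGood]
    | cons c rest =>
      rw [pvParts]
      have hs1 : 1 ≤ sep.length := by
        cases sep with
        | nil => exact absurd rfl hsep
        | cons _ _ => simp
      by_cases hpre : sep.isPrefixOf (c :: rest)
      · rw [if_pos hpre]
        have hdl : (List.drop sep.length (c :: rest)).length ≤ fuel := by
          simp only [List.length_drop, List.length_cons] at h1 ⊢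
          omega
        obtain ⟨hj, hg⟩ := ih _ hdl
        have hP := pvParts_ne_nil sep fuel (List.drop sep.length (c :: rest))
        obtain ⟨q, t, hqt⟩ : ∃ q t, pvParts sep fuel (List.drop sep.length (c :: rest)) = q :: t := by
          cases hE : pvParts sep fuel (List.drop sep.length (c :: rest)) with
          | nil => exact absurd hE hP
          | cons q t => exact ⟨q, t, rfl⟩
        rw [hqt] at hj hg ⊢
        constructor
        · have hpre' : sep <+: c :: rest := List.isPrefixOf_iff_prefix.mp hpre
          have := List.prefix_iff_eq_append.mp hpre'
          rw [pvJoin, ← hj]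
          simpa using this.symm
        · rw [pvGood]
          refine ⟨?_, hg⟩
          intro j hj
          simp at hj
      · rw [if_neg hpre]
        have hrl : rest.length ≤ fuel := by simp at h1; omega
        obtain ⟨hj, hg⟩ := ih rest hrl
        have hP := pvParts_ne_nil sep fuel rest
        obtain ⟨p, ps, hpps⟩ : ∃ p ps, pvParts sep fuel rest = p :: ps := by
          cases hE : pvParts sep fuel rest with
          | nil => exact absurd hE hP
          | cons p ps => exact ⟨p, ps, rfl⟩
        rw [hpps] at hj hg ⊢
        have hnp : ¬ sep <+: c :: rest := fun hcon => hpre (List.isPrefixOf_iff_prefix.mpr hcon)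
        cases ps with
        | nil =>
          rw [pvJoin] at hj
          constructor
          · simp [pvConsHead, pvJoin, ← hj]
          · simp [pvConsHead, pvGood]
        | cons q ps' =>
          rw [pvJoin] at hj
          constructor
          · simp only [pvConsHead]
            rw [pvJoin, hj]
            simp
          · simp only [pvConsHead, pvGood]
            refine ⟨?_, hg.2⟩
            intro j hjlt
            simp only [List.length_append, List.length_cons, List.length_nil] at hjlt
            cases j with
            | zero =>
              intro hcon
              rw [List.drop_zero] at hcon
              apply hnp
              have hlsub : [c] ++ p ++ sep <+: c :: rest := by
                refine ⟨pvJoin sep (q :: ps'), ?_⟩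
                rw [hj]
                simp
              simpa using hcon.trans hlsub
            | succ j =>
              have hred : List.drop (j + 1) ([c] ++ p ++ sep) = List.drop j (p ++ sep) := by simp
              rw [hred]
              exact hg.1 j (by omega)

-- ---------- occurrence bookkeeping ----------
lemma pv_prefix_of_prefix_long {pat a b : List Char} (h : pat <+: b) (hab : a <+: b)
    (hlen : pat.length ≤ a.length) : pat <+: a := by
  rw [List.prefix_iff_eq_take] at h hab ⊢
  rw [hab, List.take_take, min_eq_left hlen, ← h]

lemma pv_occ_of_take_eq {s s' pat : List Char} {i m : Nat}
    (h : s.take m = s'.take m) (hi : i + pat.length ≤ m) :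
    (pat <+: s.drop i ↔ pat <+: s'.drop i) := by
  have key : ∀ t : List Char, t.take m = s.take m →
      (pat <+: t.drop i ↔ pat = ((t.take m).drop i).take pat.length) := by
    intro t ht
    have : ((t.take m).drop i).take pat.length = (t.drop i).take pat.length := by
      rw [List.drop_take, List.take_take]
      congr 1
      omega
    rw [List.prefix_iff_eq_take, this]
  rw [key s rfl, key s' h.symm, h]

lemma pv_find_eq_of_first (s pat : List Char) (k : Nat)
    (hocc : pat <+: s.drop k) (hmin : ∀ i < k, ¬ pat <+: s.drop i) :
    PySem.Chars.find s pat = (k : Int) := by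
  have hin : PySem.Chars.isIn pat s = true :=
    (PySem.Chars.exists_prefix_drop_iff_isIn pat s).mp ⟨k, hocc⟩
  have hnn : 0 ≤ PySem.Chars.find s pat :=
    (PySem.Chars.find_nonneg_iff s pat).mpr ((PySem.Chars.isIn_iff_infix pat s).mp hin)
  obtain ⟨h1, h2⟩ := PySem.Chars.find_spec hnn
  have : (PySem.Chars.find s pat).toNat = k := by
    rcases Nat.lt_trichotomy (PySem.Chars.find s pat).toNat k with h | h | h
    · exact absurd h1 (hmin _ h)
    · exact h
    · exact absurd hocc (h2 _ h)
  omega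

-- 'acc is clean': no occurrence of sep starts inside acc, whatever follows it
def pvClean (sep acc : List Char) : Prop :=
  ∀ (r : List Char) (i : Nat), i < acc.length → ¬ sep <+: (acc ++ r).drop i

lemma pvClean_nil (sep : List Char) : pvClean sep [] := by
  intro r i hi
  simp at hi

lemma pvFindSplit {sep acc p : List Char} (tail : List Char) (hC : pvClean sep acc)
    (hd : ∀ j < p.length, ¬ sep <+: (p ++ sep).drop j) :
    PySem.Chars.find (acc ++ p ++ sep ++ tail) sep = ((acc.length + p.length : Nat) : Int) := by
  apply pv_find_eq_of_first
  · have hre : acc ++ p ++ sep ++ tail = (acc ++ p) ++ (sep ++ tail) := by simp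
    have hln : acc.length + p.length = (acc ++ p).length := by simp
    rw [hre, hln, List.drop_left]
    exact List.prefix_append _ _
  · intro i hi
    by_cases hia : i < acc.length
    · have := hC (p ++ sep ++ tail) i hia
      simpa [List.append_assoc] using this
    · obtain ⟨i', rfl⟩ : ∃ i', i = acc.length + i' := ⟨i - acc.length, by omega⟩
      have hip : i' < p.length := by omega
      have hdrop : (acc ++ p ++ sep ++ tail).drop (acc.length + i') = (p ++ sep).drop i' ++ tail := by
        have hre : acc ++ p ++ sep ++ tail = acc ++ ((p ++ sep) ++ tail) := by simp
        rw [hre, List.drop_length_add_append,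
          List.drop_append_of_le_length (by simp; omega)]
      rw [hdrop]
      intro hcon
      refine hd i' hip (pv_prefix_of_prefix_long hcon (List.prefix_append _ _) ?_)
      have h1 := hcon.length_le
      simp at h1 ⊢
      omega

lemma pvRep1_split {sep acc p : List Char} (tail t : List Char) (hC : pvClean sep acc)
    (hd : ∀ j < p.length, ¬ sep <+: (p ++ sep).drop j) :
    pvRep1 (acc ++ p ++ sep ++ tail) sep t = acc ++ p ++ t ++ tail := by
  rw [pvRep1]
  simp only [pvFindSplit tail hC hd]
  rw [if_neg (by omega)]
  have htoNat : ((((acc.length + p.length : Nat)) : Int)).toNat = acc.length + p.length := by omega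
  rw [htoNat]
  have htake : (acc ++ p ++ sep ++ tail).take (acc.length + p.length) = acc ++ p := by
    have hre : acc ++ p ++ sep ++ tail = (acc ++ p) ++ (sep ++ tail) := by simp
    have hln : acc.length + p.length = (acc ++ p).length := by simp only [List.length_append]
    rw [hre, hln, List.take_left]
  have hdrop : (acc ++ p ++ sep ++ tail).drop (acc.length + p.length + sep.length) = tail := by
    have hre : acc ++ p ++ sep ++ tail = (acc ++ p ++ sep) ++ tail := by simp
    have hln : acc.length + p.length + sep.length = (acc ++ p ++ sep).length := by
      simp only [List.length_append]
    rw [hre, hln, List.drop_left]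
  rw [htake, hdrop]

lemma pvClean_extend {sep acc p t : List Char} (hsep : sep ≠ []) (ht : t ≠ [])
    (hdisj : ∀ c ∈ sep, c ∉ t) (hC : pvClean sep acc)
    (hd : ∀ j < p.length, ¬ sep <+: (p ++ sep).drop j) :
    pvClean sep (acc ++ p ++ t) := by
  intro r i hi
  simp only [List.length_append] at hi
  have hslen : 0 < sep.length := by cases sep <;> simp_all
  have htlen : 0 < t.length := by cases t <;> simp_all
  by_cases h1 : i < acc.length
  · have := hC (p ++ t ++ r) i h1
    simpa [List.append_assoc] using this
  · by_cases h2 : i < acc.length + p.length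
    · obtain ⟨i', rfl⟩ : ∃ i', i = acc.length + i' := ⟨i - acc.length, by omega⟩
      have hip : i' < p.length := by omega
      have hdrop : (acc ++ p ++ t ++ r).drop (acc.length + i') = (p ++ (t ++ r)).drop i' := by
        have hre : acc ++ p ++ t ++ r = acc ++ (p ++ (t ++ r)) := by simp
        rw [hre, List.drop_length_add_append]
      rw [hdrop]
      intro hcon
      by_cases h3 : i' + sep.length ≤ p.length
      · have htk : (p ++ (t ++ r)).take p.length = (p ++ sep).take p.length := by
          rw [List.take_left, List.take_left]
        exact hd i' hip ((pv_occ_of_take_eq htk h3).mp hcon)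
      · -- the occurrence would contain t's first character
        set k := p.length - i' with hk
        have hkl : k < sep.length := by omega
        have hkd : k < ((p ++ (t ++ r)).drop i').length := by
          have := hcon.length_le
          omega
        have hv1 : ((p ++ (t ++ r)).drop i')[k]'hkd = sep[k]'hkl := (hcon.getElem hkl).symm
        have hik : i' + k = p.length := by omega
        have hv2 : ((p ++ (t ++ r)).drop i')[k]'hkd = t[0]'htlen := by
          rw [List.getElem_drop, List.getElem_append_right (by omega)]
          simp only [hik]
          rw [List.getElem_append_left (by omega)]
          congr 1
          omega
        have : sep[k]'hkl ∈ sep := List.getElem_mem _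
        have ht0 : sep[k]'hkl ∈ t := by
          rw [← hv1, hv2]
          exact List.getElem_mem _
        exact hdisj _ this ht0
    · obtain ⟨i'', rfl⟩ : ∃ i'', i = acc.length + p.length + i'' := ⟨i - acc.length - p.length, by omega⟩
      have hit : i'' < t.length := by omega
      have hdrop : (acc ++ p ++ t ++ r).drop (acc.length + p.length + i'') = (t ++ r).drop i'' := by
        have hre : acc ++ p ++ t ++ r = (acc ++ p) ++ (t ++ r) := by simp
        have hln : acc.length + p.length + i'' = (acc ++ p).length + i'' := by simp
        rw [hre, hln, List.drop_length_add_append]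
      rw [hdrop]
      intro hcon
      have h0d : 0 < ((t ++ r).drop i'').length := by
        have := hcon.length_le
        omega
      have hv1 : ((t ++ r).drop i'')[0]'h0d = sep[0]'hslen := (hcon.getElem hslen).symm
      have hv2 : ((t ++ r).drop i'')[0]'h0d = t[i'']'hit := by
        rw [List.getElem_drop, List.getElem_append_left (by omega)]
        congr 1
      exact hdisj _ (List.getElem_mem _) (by rw [← hv1, hv2]; exact List.getElem_mem _)

-- ---------- iterated pairs over the part list ----------
def pvJT (sep t0 t1 : List Char) : Nat → List Char → List (List Char) → List Char
  | 0, p, rest => pvJoin sep (p :: rest)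
  | m + 1, p, a :: b :: rest' => p ++ t0 ++ a ++ t1 ++ pvJT sep t0 t1 m b rest'
  | _ + 1, p, rest => pvJoin sep (p :: rest)

lemma pvPairIter_join {sep t0 t1 : List Char} (hsep : sep ≠ []) (ht0 : t0 ≠ []) (ht1 : t1 ≠ [])
    (hd0 : ∀ c ∈ sep, c ∉ t0) (hd1 : ∀ c ∈ sep, c ∉ t1) :
    ∀ (m : Nat) (p : List Char) (rest : List (List Char)) (acc : List Char),
      pvClean sep acc → pvGood sep (p :: rest) → 2 * m ≤ rest.length →
      pvPairIter sep t0 t1 m (acc ++ pvJoin sep (p :: rest)) = acc ++ pvJT sep t0 t1 m p rest := by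
  intro m
  induction m with
  | zero => intro p rest acc _ _ _; rfl
  | succ m ih =>
    intro p rest acc hC hG hm
    obtain ⟨a, b, rest', rfl⟩ : ∃ a b rest', rest = a :: b :: rest' := by
      match rest with
      | [] => simp at hm
      | [x] => simp at hm; omega
      | a :: b :: rest' => exact ⟨a, b, rest', rfl⟩
    obtain ⟨hdp, hda, hG'⟩ : (∀ j < p.length, ¬ sep <+: (p ++ sep).drop j) ∧
        (∀ j < a.length, ¬ sep <+: (a ++ sep).drop j) ∧ pvGood sep (b :: rest') := by
      rw [pvGood] at hG
      obtain ⟨h1, h2⟩ := hG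
      rw [pvGood] at h2
      exact ⟨h1, h2.1, h2.2⟩
    rw [pvPairIter]
    have hs : acc ++ pvJoin sep (p :: a :: b :: rest') =
        acc ++ p ++ sep ++ pvJoin sep (a :: b :: rest') := by
      rw [pvJoin]
      simp [List.append_assoc]
    rw [hs, pvRep1_split _ t0 hC hdp]
    have hC1 : pvClean sep (acc ++ p ++ t0) := pvClean_extend hsep ht0 hd0 hC hdp
    have hs1 : acc ++ p ++ t0 ++ pvJoin sep (a :: b :: rest') =
        (acc ++ p ++ t0) ++ a ++ sep ++ pvJoin sep (b :: rest') := by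
      rw [pvJoin]
      simp [List.append_assoc]
    rw [hs1, pvRep1_split _ t1 hC1 hda]
    have hC2 : pvClean sep (acc ++ p ++ t0 ++ a ++ t1) := by
      have := pvClean_extend hsep ht1 hd1 hC1 hda
      simpa [List.append_assoc] using this
    have hs2 : acc ++ p ++ t0 ++ a ++ t1 ++ pvJoin sep (b :: rest') =
        (acc ++ p ++ t0 ++ a ++ t1) ++ pvJoin sep (b :: rest') := by simp
    rw [hs2, ih b rest' _ hC2 hG' (by simp at hm; omega)]
    rw [pvJT]
    simp [List.append_assoc]

-- ---------- B-side loop reshaped ----------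
def pvPairsFlat (t0 t1 : List Char) : List (List Char) → List (List Char)
  | a :: b :: r => [t0, a, t1, b] ++ pvPairsFlat t0 t1 r
  | _ => []

def pvLeft : List (List Char) → List (List Char)
  | _ :: _ :: r => pvLeft r
  | r => r

def pvTailPart (sep : List Char) : List (List Char) → List Char
  | [] => []
  | q :: _ => sep ++ q

lemma pvWhileB_eq (t0 t1 : List Char) :
    ∀ (rest out : List (List Char)),
      pvWhileB t0 t1 out rest = (out ++ pvPairsFlat t0 t1 rest, pvLeft rest) := by
  intro rest
  induction rest using pvLeft.induct with
  | case1 a b r ih =>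
    intro out
    rw [pvWhileB, ih, pvPairsFlat, pvLeft]
    simp
  | case2 r h =>
    intro out
    match r, h with
    | [], _ => simp [pvWhileB, pvPairsFlat, pvLeft]
    | [x], _ => simp [pvWhileB, pvPairsFlat, pvLeft]
    | a :: b :: r', h => exact (h a b r' rfl).elim

lemma pv_join_nil_flatten : ∀ L : List (List Char), PySem.Chars.join [] L = L.flatten := by
  have aux : ∀ L : List (List Char), (List.intersperse ([] : List Char) L).flatten = L.flatten := by
    intro L
    induction L with
    | nil => rfl
    | cons a t ih =>
      cases t with
      | nil => rfl
      | cons b t' =>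
        rw [List.intersperse]
        simp only [List.flatten_cons, List.nil_append] at ih ⊢
        rw [ih]
        simp
  intro L
  rw [PySem.Chars.join, List.intercalate, aux]

lemma pvJT_flat (sep t0 t1 : List Char) :
    ∀ (m : Nat) (p : List Char) (rest : List (List Char)),
      2 * m ≤ rest.length → rest.length < 2 * m + 2 →
      pvJT sep t0 t1 m p rest =
        p ++ (pvPairsFlat t0 t1 rest).flatten ++ pvTailPart sep (pvLeft rest) := by
  intro m
  induction m with
  | zero =>
    intro p rest _ h2
    match rest, h2 with
    | [], _ => simp [pvJT, pvJoin, pvPairsFlat, pvLeft, pvTailPart]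
    | [q], _ => simp [pvJT, pvJoin, pvPairsFlat, pvLeft, pvTailPart]
  | succ m ih =>
    intro p rest h1 h2
    obtain ⟨a, b, rest', rfl⟩ : ∃ a b rest', rest = a :: b :: rest' := by
      match rest with
      | [] => simp at h1
      | [x] => simp at h1; omega
      | a :: b :: rest' => exact ⟨a, b, rest', rfl⟩
    rw [pvJT, ih b rest' (by simp at h1; omega) (by simp at h2; omega)]
    rw [pvPairsFlat, pvLeft]
    simp [List.append_assoc]

-- ===== VERDICT (by name: the statement is the Claim_ definition above) =====
theorem changeBoldOrEmphasis_spec : Claim_equal_changeBoldOrEmphasis := by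
  intro line replace tags _hdom hpre
  obtain ⟨hsep, hpre2⟩ := hpre
  unfold Spec_changeBoldOrEmphasis
  simp only [changeBoldOrEmphasis, changeBoldOrEmphasis_alt]
  have hsplit? : PySem.Chars.split? line.toList replace.toList =
      some (PySem.Chars.splitOn line.toList replace.toList) := by
    rw [PySem.Chars.split?, if_neg (by simpa using hsep)]
  rw [pv_splitOn_eq] at hsplit?
  have hP := pvParts_ne_nil replace.toList (line.toList.length + 1) line.toList
  obtain ⟨p0, rest, hparts⟩ : ∃ p0 rest,
      pvParts replace.toList (line.toList.length + 1) line.toList = p0 :: rest := by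
    cases hE : pvParts replace.toList (line.toList.length + 1) line.toList with
    | nil => exact absurd hE hP
    | cons p0 rest => exact ⟨p0, rest, rfl⟩
  rw [hparts] at hsplit?
  have hcount : PySem.Str.count line replace = rest.length := by
    rw [PySem.Str.count, pv_count_eq _ _ hsep]
    have h1 := pvParts_length replace.toList line.toList.length line.toList
    rw [pvParts_fuel replace.toList hsep line.toList.length (line.toList.length + 1)
      line.toList (le_refl _) (by omega), hparts] at h1
    simp at h1 ⊢
    omega
  rw [hsplit?]
  dsimp only
  rw [pv_loopA_eq_pairIter _ _ _ ((PySem.Str.count line replace : Int)).toNat _ _ (le_refl _)]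
  have htoNat : ((PySem.Str.count line replace : Int)).toNat = rest.length := by
    rw [hcount]; omega
  rw [htoNat]
  by_cases hc2 : rest.length < 2
  · -- fewer than two occurrences: both sides return the line unchanged
    rw [if_pos hc2]
    have h0 : rest.length / 2 = 0 := by omega
    rw [h0]
    show String.ofList line.toList = line
    exact String.ofList_toList
  · rw [if_neg hc2]
    rcases hpre2 with hlt | ⟨htl, hts⟩
    · rw [hcount] at hlt; omega
    · obtain ⟨g0, g1, gr, rfl⟩ : ∃ g0 g1 gr, tags = g0 :: g1 :: gr := by
        match tags, htl with
        | g0 :: g1 :: gr, _ => exact ⟨g0, g1, gr, rfl⟩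
      have hg0 : PySem.List.pyGetD (g0 :: g1 :: gr) 0 "" = g0 := by
        simp [pysem]
      have hg1 : PySem.List.pyGetD (g0 :: g1 :: gr) 1 "" = g1 := by
        simp [pysem]
      rw [hg0, hg1]
      simp only [List.take, List.all_cons, List.all_nil, Bool.and_true, Bool.and_eq_true,
        Bool.not_eq_eq_eq_not, Bool.not_true, List.all_eq_true,
        List.contains_eq_mem, decide_eq_false_iff_not] at hts
      obtain ⟨⟨ht0', hd0'⟩, ht1', hd1'⟩ := hts
      have ht0 : g0.toList ≠ [] := by
        intro h
        rw [h] at ht0'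
        simp at ht0'
      have ht1 : g1.toList ≠ [] := by
        intro h
        rw [h] at ht1'
        simp at ht1'
      obtain ⟨hjoin, hgood⟩ := pvParts_spec replace.toList hsep (line.toList.length + 1)
        line.toList (by omega)
      rw [hparts] at hjoin hgood
      have hbound1 : 2 * (rest.length / 2) ≤ rest.length := by omega
      have hiter := pvPairIter_join hsep ht0 ht1 hd0' hd1' (rest.length / 2) p0 rest []
        (pvClean_nil _) hgood hbound1
      rw [List.nil_append] at hiter
      rw [hjoin, hiter]
      rw [pvWhileB_eq]
      have hflat := pvJT_flat replace.toList g0.toList g1.toList (rest.length / 2) p0 rest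
        hbound1 (by omega)
      rw [hflat]
      cases hleft : pvLeft rest with
      | nil =>
        simp only [pv_join_nil_flatten]
        simp [pvTailPart]
      | cons r0 rl =>
        simp only [pv_join_nil_flatten]
        simp [pvTailPart, List.append_assoc]
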